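-- pv_equiv track=rewrite | github.com/Gitvidor/crontab-manager | app.py | extract_command_from_at_content
-- ===== SOURCE A (Python) =====
-- def extract_command_from_at_content(content: str) -> str:
--     """从 at -c 输出中提取实际命令"""
--     # at -c 输出包含很多环境变量设置，实际命令在最后
--     lines = content.strip().split('\n')
--     # 跳过环境设置，从 cd 开始或最后几行是实际命令
--     command_lines = []
--     capture = False
--     for line in reversed(lines):
--         # 跳过 ${SHELL...} 这类行
--         if line.startswith('${') or not line.strip():
--             continue
--         command_lines.insert(0, line)
--         if line.startswith('cd '):
--             break
--         # 只取最后几行有意义的命令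
--         if len(command_lines) >= 5:
--             break
--     return '\n'.join(command_lines) if command_lines else content[-500:]
-- ===== SOURCE B (Python) =====
-- def extract_command_from_at_content(content: str) -> str:
--     """从 at -c 输出中提取实际命令"""
--     meaningful = [l for l in content.strip().split('\n')
--                   if l.strip() and not l.startswith('${')]
--     if not meaningful:
--         return content[-500:]
--     window = meaningful[-5:]
--     cds = [i for i, l in enumerate(window) if l.startswith('cd ')]
--     start = cds[-1] if cds else 0
--     return '\n'.join(window[start:])
-- ===== Notes on version B (the rewrite author's own statement) =====
-- stated objective: simpler
-- what changed: A's single reverse loop with early breaks and insert(0) is replaced by a filter pass over the lines, a [-5:] window slice, and a comprehension that computes the index of the last cd-prefixed line to cut the window.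
import Mathlib
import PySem

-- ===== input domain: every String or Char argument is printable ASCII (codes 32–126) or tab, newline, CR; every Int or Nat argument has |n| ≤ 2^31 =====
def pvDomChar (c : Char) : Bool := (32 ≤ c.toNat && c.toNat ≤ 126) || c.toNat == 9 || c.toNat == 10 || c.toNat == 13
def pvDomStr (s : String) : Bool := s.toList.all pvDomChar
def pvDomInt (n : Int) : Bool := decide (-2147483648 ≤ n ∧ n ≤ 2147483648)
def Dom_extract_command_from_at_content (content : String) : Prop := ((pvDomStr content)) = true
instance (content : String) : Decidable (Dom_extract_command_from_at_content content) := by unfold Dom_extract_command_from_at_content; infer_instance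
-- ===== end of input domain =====

-- B replaces A's single reverse loop with early breaks by a filter pass, a [-5:] window
-- slice and a comprehension computing the cut index of the last cd-prefixed line (objective: simpler).

-- ===== PORT A =====
-- the reverse loop of A: skip '${'/blank lines, prepend, break on 'cd ' or 5 collected lines
def pvLoopA : List String → List String → List String
  | [], acc => acc
  | line :: rest, acc =>
    if PySem.Str.startswith line "${" || (PySem.Str.strip line == "") then
      pvLoopA rest acc
    else
      let acc' := line :: acc      -- command_lines.insert(0, line)
      if PySem.Str.startswith line "cd " then acc'
      else if 5 ≤ acc'.length then acc'
      else pvLoopA rest acc'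

def extract_command_from_at_content (content : String) : String :=
  let lines := (PySem.Str.split? (PySem.Str.strip content) "\n").getD []   -- sep "\n" ≠ "": never none
  let command_lines := pvLoopA lines.reverse []
  if command_lines = [] then PySem.Str.slice content (some (-500)) none
  else PySem.Str.join "\n" command_lines

-- ===== PORT B =====
def pvKeep (l : String) : Bool := (PySem.Str.strip l != "") && !(PySem.Str.startswith l "${")

def extract_command_from_at_content_alt (content : String) : String :=
  let meaningful := ((PySem.Str.split? (PySem.Str.strip content) "\n").getD []).filter pvKeep
  if meaningful = [] then PySem.Str.slice content (some (-500)) none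
  else
    let window := PySem.List.slice meaningful (some (-5)) none
    let cds := ((PySem.List.enumerate window).filter
                  (fun pr => PySem.Str.startswith pr.2 "cd ")).map Prod.fst
    let start := cds.getLast?.getD 0
    PySem.Str.join "\n" (PySem.List.slice window (some start) none)

-- ===== PRECONDITION & SPEC =====
def Spec_extract_command_from_at_content (content : String) (out : String) : Prop := out = extract_command_from_at_content_alt content
instance (content : String) (out : String) : Decidable (Spec_extract_command_from_at_content content out) := by unfold Spec_extract_command_from_at_content; infer_instance

-- ===== CLAIM (what is proved, stated in full; the proofs are below) =====
def Claim_equal_extract_command_from_at_content : Prop := ∀ (content : String), Dom_extract_command_from_at_content content → Spec_extract_command_from_at_content content (extract_command_from_at_content content)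

-- ===== LEMMAS AND PROOFS =====

def pvCd (l : String) : Bool := PySem.Str.startswith l "cd "

-- A's loop with the skip branch removed (runs on the pre-filtered list)
def pvLoopB : List String → List String → List String
  | [], acc => acc
  | line :: rest, acc =>
    let acc' := line :: acc
    if pvCd line then acc'
    else if 5 ≤ acc'.length then acc'
    else pvLoopB rest acc'

-- forward prefix collected by pvLoopB: up to (incl.) the first cd line, at most k lines
def pvTakeStop : List String → Nat → List String
  | _, 0 => []
  | [], _ + 1 => []
  | line :: rest, k + 1 =>
    line :: (if pvCd line then [] else if k = 0 then [] else pvTakeStop rest k)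

-- index of the LAST cd line, as B's comprehension computes it
def pvLastCd : List String → Option Nat
  | [] => none
  | x :: xs =>
    match pvLastCd xs with
    | some k => some (k + 1)
    | none => if pvCd x then some 0 else none

lemma pvKeep_not (l : String) :
    (PySem.Str.startswith l "${" || (PySem.Str.strip l == "")) = !pvKeep l := by
  simp [pvKeep]
  cases h1 : PySem.Str.startswith l "${" <;>
    cases h2 : (PySem.Str.strip l == "") <;> simp_all [bne]

lemma loopA_eq_loopB (rs : List String) : ∀ acc, pvLoopA rs acc = pvLoopB (rs.filter pvKeep) acc := by
  induction rs with
  | nil => intro acc; simp [pvLoopA, pvLoopB]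
  | cons line rest ih =>
    intro acc
    rw [pvLoopA, pvKeep_not]
    cases h : pvKeep line with
    | false => simpa [h] using ih acc
    | true =>
      have hf : List.filter pvKeep (line :: rest) = line :: List.filter pvKeep rest := by
        simp [List.filter_cons, h]
      rw [hf, pvLoopB]
      simp only [h, Bool.not_true, Bool.false_eq_true, if_false, pvCd]
      split
      · rfl
      · split
        · rfl
        · exact ih _

lemma loopB_eq_takeStop (rs : List String) : ∀ acc, acc.length < 5 →
    pvLoopB rs acc = (pvTakeStop rs (5 - acc.length)).reverse ++ acc := by
  induction rs with
  | nil => intro acc h; cases h5 : 5 - acc.length with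
    | zero => omega
    | succ k => simp [pvLoopB, pvTakeStop, h5]
  | cons line rest ih =>
    intro acc h
    have h5 : 5 - acc.length = (4 - acc.length) + 1 := by omega
    rw [pvLoopB, h5, pvTakeStop]
    by_cases hcd : pvCd line
    · simp [hcd]
    · simp only [hcd, Bool.false_eq_true, if_false]
      by_cases hlen : 5 ≤ (line :: acc).length
      · have h4 : 4 - acc.length = 0 := by simp at hlen; omega
        simp [h4]
        intro hc
        exact absurd hc (by simp at hlen; omega)
      · have h4 : 4 - acc.length ≠ 0 := by simp at hlen; omega
        have hlt : (line :: acc).length < 5 := by simp at hlen ⊢; omega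
        rw [if_neg hlen, ih _ hlt]
        have h45 : 5 - (line :: acc).length = 4 - acc.length := by
          simp only [List.length_cons]; omega
        simp [h45, h4]

lemma takeStop_eq_take (rs : List String) : ∀ k, pvTakeStop rs k = rs.take (min k (rs.findIdx pvCd + 1)) := by
  induction rs with
  | nil => intro k; cases k <;> simp [pvTakeStop]
  | cons line rest ih =>
    intro k
    cases k with
    | zero => simp [pvTakeStop]
    | succ k' =>
      rw [pvTakeStop, List.findIdx_cons]
      by_cases hcd : pvCd line
      · simp [hcd]
      · simp only [hcd, Bool.false_eq_true, if_false, cond_false]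
        by_cases hk : k' = 0
        · simp [hk]
        · rw [if_neg hk, ih k']
          have hm : min (k' + 1) (rest.findIdx pvCd + 1 + 1) = min k' (rest.findIdx pvCd + 1) + 1 := by omega
          simp [hm]

lemma lastCd_eq (w : List String) : ∀ s : Int,
    (((PySem.List.enumerate w s).filter (fun pr => PySem.Str.startswith pr.2 "cd ")).map Prod.fst).getLast?
      = (pvLastCd w).map (fun k : Nat => s + (k : Int)) := by
  induction w with
  | nil => intro s; simp [pvLastCd, PySem.List.enumerate_nil]
  | cons x xs ih =>
    intro s
    rw [PySem.List.enumerate_cons]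
    simp only [pvLastCd, List.filter_cons]
    cases hg : pvLastCd xs with
    | some k =>
      have htail := ih (s + 1)
      rw [hg, Option.map_some] at htail
      cases hL : (List.filter (fun pr => PySem.Str.startswith pr.2 "cd ") (PySem.List.enumerate xs (s+1))).getLast? with
      | none =>
        rw [List.getLast?_eq_none_iff] at hL
        rw [hL] at htail
        simp at htail
      | some pr =>
        have hpr : pr.1 = s + 1 + k := by
          rw [List.getLast?_map, hL] at htail
          simpa using htail
        by_cases hx : PySem.Str.startswith x "cd "
        · rw [if_pos (by simpa using hx), List.map_cons, List.getLast?_cons, List.getLast?_map, hL]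
          simp [hpr]; ring
        · rw [if_neg (by simpa using hx), List.getLast?_map, hL]
          simp [hpr]; ring
    | none =>
      have htail := ih (s + 1)
      rw [hg, Option.map_none] at htail
      have hnil : (List.filter (fun pr => PySem.Str.startswith pr.2 "cd ") (PySem.List.enumerate xs (s+1))) = [] := by
        rw [List.getLast?_map] at htail
        rw [← List.getLast?_eq_none_iff]
        cases hL : (List.filter (fun pr => PySem.Str.startswith pr.2 "cd ") (PySem.List.enumerate xs (s+1))).getLast? with
        | none => rfl
        | some pr => rw [hL] at htail; simp at htail
      by_cases hx : PySem.Str.startswith x "cd "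
      · rw [if_pos (by simpa using hx), hnil]
        simp [pvCd]
        simpa using hx
      · rw [if_neg (by simpa using hx), hnil]
        simp [pvCd]
        simpa using hx

lemma lastCd_rev (w : List String) :
    pvLastCd w = if w.reverse.findIdx pvCd < w.length then some (w.length - 1 - w.reverse.findIdx pvCd) else none := by
  induction w with
  | nil => simp [pvLastCd]
  | cons x xs ih =>
    have hle : xs.reverse.findIdx pvCd ≤ xs.length := by
      simpa using List.findIdx_le_length (p := pvCd) (xs := xs.reverse)
    have happ : (x :: xs).reverse.findIdx pvCd =
        if xs.reverse.findIdx pvCd < xs.reverse.length then xs.reverse.findIdx pvCd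
        else [x].findIdx pvCd + xs.reverse.length := by
      rw [List.reverse_cons]
      exact List.findIdx_append
    by_cases h : xs.reverse.findIdx pvCd < xs.length
    · have hf : (x :: xs).reverse.findIdx pvCd = xs.reverse.findIdx pvCd := by
        rw [happ, if_pos (by simpa using h)]
      simp only [pvLastCd, ih, if_pos h, hf, List.length_cons]
      rw [if_pos (by omega)]
      congr 1
      omega
    · have hx : xs.reverse.findIdx pvCd = xs.length := by omega
      by_cases hcd : pvCd x
      · have hf : (x :: xs).reverse.findIdx pvCd = xs.length := by
          rw [happ, if_neg (by simpa using h)]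
          simp [List.findIdx_cons, hcd]
        simp only [pvLastCd, ih, if_neg h, if_pos hcd, hf, List.length_cons]
        rw [if_pos (by omega)]
        congr 1
        omega
      · have hf : (x :: xs).reverse.findIdx pvCd = 1 + xs.length := by
          rw [happ, if_neg (by simpa using h)]
          simp [List.findIdx_cons, hcd, hx]
        simp only [pvLastCd, ih, if_neg h, if_neg hcd, hf, List.length_cons]
        rw [if_neg (by omega)]

lemma take_min_findIdx (rs : List String) : ∀ k : Nat,
    rs.take (min k (rs.findIdx pvCd + 1)) = (rs.take k).take ((rs.take k).findIdx pvCd + 1) := by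
  induction rs with
  | nil => intro k; simp
  | cons line rest ih =>
    intro k
    cases k with
    | zero => simp
    | succ k' =>
      rw [List.take_succ_cons, List.findIdx_cons, List.findIdx_cons]
      by_cases hcd : pvCd line
      · simp [hcd]
      · simp only [hcd, cond_false]
        have hm : min (k' + 1) (rest.findIdx pvCd + 1 + 1) = min k' (rest.findIdx pvCd + 1) + 1 := by omega
        rw [hm, List.take_succ_cons, List.take_succ_cons, ih k']

-- B's window cut equals "last (first-cd-in-reverse + 1) elements" of the window
lemma window_drop (w : List String) :
    PySem.List.slice w (some ((((PySem.List.enumerate w).filter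
        (fun pr => PySem.Str.startswith pr.2 "cd ")).map Prod.fst).getLast?.getD 0)) none
      = (w.reverse.take (w.reverse.findIdx pvCd + 1)).reverse := by
  have h0 := lastCd_eq w 0
  rw [lastCd_rev] at h0
  have he : (PySem.List.enumerate w 0) = (PySem.List.enumerate w) := rfl
  rw [he] at h0
  by_cases h : w.reverse.findIdx pvCd < w.length
  · rw [if_pos h] at h0
    rw [h0]
    simp only [Option.map_some, Option.getD_some, zero_add]
    rw [PySem.List.slice_from_natCast]
    have hrev : w.reverse.take (w.reverse.findIdx pvCd + 1)
        = (w.drop (w.length - (w.reverse.findIdx pvCd + 1))).reverse := by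
      rw [List.reverse_drop]
      congr 1; omega
    rw [hrev, List.reverse_reverse]
    congr 1; omega
  · rw [if_neg h] at h0
    rw [h0]
    have hx : w.reverse.findIdx pvCd = w.length := by
      have := List.findIdx_le_length (p := pvCd) (xs := w.reverse)
      simp at this; omega
    rw [hx]
    have ht : w.reverse.take (w.length + 1) = w.reverse := List.take_of_length_le (by simp)
    rw [ht, List.reverse_reverse]
    simpa using PySem.List.slice_from_natCast w 0

lemma take_min_len (l : List String) (k : Nat) : l.take (min k l.length) = l.take k := by
  rcases le_total k l.length with h | h
  · rw [min_eq_left h]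
  · rw [min_eq_right h, List.take_of_length_le h, List.take_of_length_le (by omega)]

-- the list A returns, in closed form over the meaningful lines ms
lemma loopA_closed (lines : List String) :
    pvLoopA lines.reverse []
      = (((lines.filter pvKeep).reverse).take (min 5 ((lines.filter pvKeep).reverse.findIdx pvCd + 1))).reverse := by
  rw [loopA_eq_loopB, List.filter_reverse, loopB_eq_takeStop _ [] (by simp), takeStop_eq_take]
  simp

-- the window cut of B equals A's closed form
lemma b_core (ms : List String) :
    PySem.List.slice (PySem.List.slice ms (some (-5)) none)
        (some ((((PySem.List.enumerate (PySem.List.slice ms (some (-5)) none)).filter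
          (fun pr => PySem.Str.startswith pr.2 "cd ")).map Prod.fst).getLast?.getD 0)) none
      = (ms.reverse.take (min 5 (ms.reverse.findIdx pvCd + 1))).reverse := by
  rw [window_drop]
  have hw : PySem.List.slice ms (some (-5)) none = ms.drop (ms.length - 5) :=
    PySem.List.slice_from_neg_ofNat ms 5 (by omega)
  have hwrev : (PySem.List.slice ms (some (-5)) none).reverse = ms.reverse.take 5 := by
    rw [hw, List.reverse_drop]
    have : ms.length - (ms.length - 5) = min 5 ms.length := by omega
    rw [this]
    have hlen : ms.length = ms.reverse.length := by simp
    rw [hlen, take_min_len]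
  rw [hwrev, take_min_findIdx ms.reverse 5]

-- ===== VERDICT (by name: the statement is the Claim_ definition above) =====
theorem extract_command_from_at_content_spec : Claim_equal_extract_command_from_at_content := by
  intro content _
  unfold Spec_extract_command_from_at_content
  unfold extract_command_from_at_content extract_command_from_at_content_alt
  simp only []
  set lines := (PySem.Str.split? (PySem.Str.strip content) "\n").getD [] with hlines
  by_cases hms : lines.filter pvKeep = []
  · have hA : pvLoopA lines.reverse [] = [] := by
      rw [loopA_eq_loopB, List.filter_reverse, hms]; rfl
    rw [hA, hms, if_pos rfl, if_pos rfl]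
  · have hA := loopA_closed lines
    have hAne : pvLoopA lines.reverse [] ≠ [] := by
      rw [hA]
      simp only [ne_eq, List.reverse_eq_nil_iff, List.take_eq_nil_iff]
      push_neg
      constructor
      · omega
      · simpa using hms
    rw [if_neg hAne, if_neg hms]
    exact congrArg (PySem.Str.join "\n") (hA.trans (b_core (lines.filter pvKeep)).symm)
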